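-- pv_equiv track=rewrite | github.com/arksap2002/fl-2021-hse-win | solution/parser/main.py | get_if_value
-- ===== SOURCE A (Python) =====
-- def char_checking(ch):
--     if ch == '>':
--         return "&gt;"
--     if ch == '<':
--         return "&lt;"
--     if ch == '&':
--         return "&amp;"
--     if ch != ' ':
--         return ch
--     return ''
--
-- def get_if_value(s):
--     result = ""
--     index = 0
--     while index < len(s) and s[index] != '(':
--         index += 1
--     index += 1
--     while index < len(s) and s[index] != ')':
--         result += char_checking(s[index])
--         index += 1
--     return result
-- ===== SOURCE B (Python) =====
-- def get_if_value(s):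
--     start = s.find('(')
--     if start == -1:
--         return ''
--     end = s.find(')', start + 1)
--     if end == -1:
--         end = len(s)
--     text = s[start + 1:end]
--     return (text.replace('&', '&amp;')
--                 .replace('<', '&lt;')
--                 .replace('>', '&gt;')
--                 .replace(' ', ''))
-- ===== Notes on version B (the rewrite author's own statement) =====
-- stated objective: faster
-- what changed: Replaces A's per-character while-loop scan (with quadratic string += accumulation) by boundary lookups (str.find), a slice and a chain of whole-string str.replace passes.
import Mathlib
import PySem

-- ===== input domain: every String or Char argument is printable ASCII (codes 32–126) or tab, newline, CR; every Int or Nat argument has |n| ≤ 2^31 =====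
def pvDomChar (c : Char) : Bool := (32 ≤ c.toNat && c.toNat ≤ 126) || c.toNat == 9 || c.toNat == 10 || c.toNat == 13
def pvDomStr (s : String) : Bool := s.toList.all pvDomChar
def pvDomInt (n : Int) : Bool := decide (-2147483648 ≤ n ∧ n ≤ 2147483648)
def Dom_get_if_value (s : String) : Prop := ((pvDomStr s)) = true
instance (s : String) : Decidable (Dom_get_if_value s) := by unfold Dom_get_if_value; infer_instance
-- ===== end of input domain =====

-- B replaces A's per-character while-loop scan (quadratic string += accumulation) by find-based
-- boundary lookups, a slice and a chain of whole-string replace passes (measured faster; same return value on every input).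

-- ===== PORT A =====
def char_checking (ch : Char) : String :=
  if ch = '>' then "&gt;"
  else if ch = '<' then "&lt;"
  else if ch = '&' then "&amp;"
  else if ch ≠ ' ' then String.ofList [ch]
  else ""

-- first while loop: advance index until '(' or end; the suffix of s at the final index
def pvA_skip : List Char → List Char
  | [] => []
  | ch :: rest => if ch = '(' then ch :: rest else pvA_skip rest

-- second while loop: append char_checking of each char until ')' or end
def pvA_collect : List Char → String
  | [] => ""
  | ch :: rest => if ch = ')' then "" else char_checking ch ++ pvA_collect rest

def get_if_value (s : String) : String :=
  pvA_collect (pvA_skip s.toList).tail   -- .tail is the 'index += 1' between the two loops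

-- ===== PORT B =====
def get_if_value_alt (s : String) : String :=
  let start := PySem.Str.find s "("
  if start = -1 then ""
  else
    let e := PySem.Str.findFrom s ")" (start + 1)
    let e := if e = -1 then PySem.Str.len s else e
    let text := PySem.Str.slice s (some (start + 1)) (some e)
    PySem.Str.replace (PySem.Str.replace (PySem.Str.replace
      (PySem.Str.replace text "&" "&amp;") "<" "&lt;") ">" "&gt;") " " ""

-- ===== PRECONDITION & SPEC =====
def Spec_get_if_value (s : String) (out : String) : Prop := out = get_if_value_alt s
instance (s : String) (out : String) : Decidable (Spec_get_if_value s out) := by unfold Spec_get_if_value; infer_instance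

-- ===== CLAIM (what is proved, stated in full; the proofs are below) =====
def Claim_equal_get_if_value : Prop := ∀ (s : String), Dom_get_if_value s → Spec_get_if_value s (get_if_value s)

-- ===== LEMMAS AND PROOFS =====

-- the list of characters A appends for one character
def pvEsc (c : Char) : List Char := (char_checking c).toList

theorem pv_go_single (c : Char) (r : List Char) :
    ∀ (fuel : Nat) (l acc : List Char), l.length ≤ fuel →
    PySem.Chars.replace.go [c] r fuel l acc =
      acc.reverse ++ l.flatMap (fun x => if x = c then r else [x]) := by
  intro fuel
  induction fuel with
  | zero =>
    intro l acc h
    have : l = [] := List.length_eq_zero_iff.mp (Nat.le_zero.mp h)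
    subst this
    simp [PySem.Chars.replace.go]
  | succ n ih =>
    intro l acc h
    cases l with
    | nil => simp [PySem.Chars.replace.go]
    | cons x t =>
      simp only [PySem.Chars.replace.go]
      by_cases hx : x = c
      · subst hx
        have hp : List.isPrefixOf [x] (x :: t) = true := by simp [List.isPrefixOf]
        rw [if_pos hp]
        have hd : List.drop [x].length (x :: t) = t := by simp
        rw [hd, ih t (r.reverse ++ acc) (by simpa using Nat.le_of_succ_le_succ h)]
        simp
      · have hp : List.isPrefixOf [c] (x :: t) = false := by
          simp [List.isPrefixOf]
          intro h'; exact absurd h'.symm hx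
        rw [if_neg (by simp [hp]), ih t (x :: acc) (by simpa using Nat.le_of_succ_le_succ h)]
        simp [hx]

theorem pv_replace_single (l : List Char) (c : Char) (r : List Char) :
    PySem.Chars.replace l [c] r = l.flatMap (fun x => if x = c then r else [x]) := by
  simp [PySem.Chars.replace, pv_go_single c r l.length l [] le_rfl]

theorem pv_chain_char (x : Char) :
    List.flatMap (fun w => if w = ' ' then ([] : List Char) else [w])
      (List.flatMap (fun z => if z = '>' then "&gt;".toList else [z])
        (List.flatMap (fun y => if y = '<' then "&lt;".toList else [y])
          (if x = '&' then "&amp;".toList else [x]))) = pvEsc x := by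
  by_cases h1 : x = '&'
  · subst h1; decide
  by_cases h2 : x = '<'
  · subst h2; decide
  by_cases h3 : x = '>'
  · subst h3; decide
  by_cases h4 : x = ' '
  · subst h4; decide
  · simp [h1, h2, h3, h4, pvEsc, char_checking]

theorem pv_chain_eq (t : List Char) :
    PySem.Chars.replace (PySem.Chars.replace (PySem.Chars.replace
      (PySem.Chars.replace t "&".toList "&amp;".toList) "<".toList "&lt;".toList)
      ">".toList "&gt;".toList) " ".toList "".toList
    = t.flatMap pvEsc := by
  have e1 : "&".toList = ['&'] := rfl
  have e2 : "<".toList = ['<'] := rfl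
  have e3 : ">".toList = ['>'] := rfl
  have e4 : " ".toList = [' '] := rfl
  have e5 : "".toList = ([] : List Char) := rfl
  rw [e1, e2, e3, e4, e5, pv_replace_single, pv_replace_single, pv_replace_single,
    pv_replace_single]
  induction t with
  | nil => rfl
  | cons x t ih =>
    rw [List.flatMap_cons, List.flatMap_append, List.flatMap_append, List.flatMap_append,
      List.flatMap_cons, ih, pv_chain_char]

theorem pv_singleton_prefix {c x : Char} {t : List Char} :
    [c] <+: (x :: t) ↔ x = c := by
  constructor
  · rintro ⟨u, hu⟩; exact (List.cons.injEq _ _ _ _ ▸ hu).1.symm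
  · rintro rfl; exact ⟨t, rfl⟩

theorem pv_singleton_infix {c : Char} {l : List Char} : [c] <:+: l ↔ c ∈ l := by
  constructor
  · intro h; exact h.subset (List.mem_singleton_self c)
  · intro h
    obtain ⟨u, v, rfl⟩ := List.append_of_mem h
    exact ⟨u, v, by simp⟩

theorem pv_dropWhile_of_spec (c : Char) :
    ∀ (l : List Char) (k : Nat), (∀ i < k, ¬ ([c] <+: l.drop i)) → ([c] <+: l.drop k) →
    l.dropWhile (fun x => x ≠ c) = l.drop k := by
  intro l
  induction l with
  | nil => intro k _ hk; simp at hk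
  | cons x t ih =>
    intro k hmin hk
    cases k with
    | zero =>
      have hx : x = c := pv_singleton_prefix.mp hk
      simp [List.dropWhile, hx]
    | succ k' =>
      have hx : x ≠ c := fun h => hmin 0 (Nat.succ_pos _) (by subst h; exact ⟨t, rfl⟩)
      have hrec := ih k' (fun i hi => by simpa using hmin (i+1) (Nat.succ_lt_succ hi)) (by simpa using hk)
      rw [List.drop_succ_cons, ← hrec, List.dropWhile_cons_of_pos (by simp [hx])]

theorem pv_takeWhile_of_spec (c : Char) :
    ∀ (l : List Char) (k : Nat), (∀ i < k, ¬ ([c] <+: l.drop i)) → ([c] <+: l.drop k) →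
    l.takeWhile (fun x => x ≠ c) = l.take k := by
  intro l
  induction l with
  | nil => intro k _ hk; simp at hk
  | cons x t ih =>
    intro k hmin hk
    cases k with
    | zero =>
      have hx : x = c := pv_singleton_prefix.mp hk
      simp [List.takeWhile, hx]
    | succ k' =>
      have hx : x ≠ c := fun h => hmin 0 (Nat.succ_pos _) (by subst h; exact ⟨t, rfl⟩)
      have hrec := ih k' (fun i hi => by simpa using hmin (i+1) (Nat.succ_lt_succ hi)) (by simpa using hk)
      rw [List.take_succ_cons, ← hrec, List.takeWhile_cons_of_pos (by simp [hx])]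

theorem pv_skip_eq (l : List Char) : pvA_skip l = l.dropWhile (fun x => x ≠ '(') := by
  induction l with
  | nil => rfl
  | cons x t ih =>
    by_cases hx : x = '('
    · rw [pvA_skip, if_pos hx, List.dropWhile_cons_of_neg (by simp [hx])]
    · rw [pvA_skip, if_neg hx, List.dropWhile_cons_of_pos (by simp [hx]), ih]

theorem pv_collect_eq (l : List Char) :
    (pvA_collect l).toList = (l.takeWhile (fun x => x ≠ ')')).flatMap pvEsc := by
  induction l with
  | nil => rfl
  | cons x t ih =>
    by_cases hx : x = ')'
    · rw [pvA_collect, if_pos hx, List.takeWhile_cons_of_neg (by simp [hx])]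
      rfl
    · rw [pvA_collect, if_neg hx, List.takeWhile_cons_of_pos (by simp [hx]),
        List.flatMap_cons, String.toList_append, ih]
      rfl

-- ===== VERDICT (by name: the statement is the Claim_ definition above) =====
theorem get_if_value_spec : Claim_equal_get_if_value := by
  intro s _
  unfold Spec_get_if_value get_if_value get_if_value_alt
  apply String.toList_inj.mp
  simp only [PySem.Str.find_eq, PySem.Str.findFrom_eq]
  rw [show ("(".toList) = ['('] from rfl, show (")".toList) = [')'] from rfl]
  by_cases hneg : PySem.Chars.find s.toList ['('] = -1
  · -- no '(' in s: A skips the whole string, B returns ''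
    have hnotmem : '(' ∉ s.toList := fun hm =>
      (PySem.Chars.find_eq_neg_one_iff s.toList ['(']).mp hneg (pv_singleton_infix.mpr hm)
    have hdrop : s.toList.dropWhile (fun x => x ≠ '(') = [] :=
      List.dropWhile_eq_nil_iff.mpr (fun x hx => by
        simp only [ne_eq, decide_eq_true_eq]
        rintro rfl; exact hnotmem hx)
    rw [if_pos hneg, pv_skip_eq, hdrop]
    rfl
  · -- '(' found at index k
    have hpos : 0 ≤ PySem.Chars.find s.toList ['('] := by
      have := PySem.Chars.neg_one_le_find s.toList ['(']
      omega
    obtain ⟨hpre, hmin⟩ := PySem.Chars.find_spec (s := s.toList) (sub := ['(']) hpos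
    set k : Nat := (PySem.Chars.find s.toList ['(']).toNat with hk
    have hfk : PySem.Chars.find s.toList ['('] = (k : Int) := by omega
    have hklen : k < s.toList.length := by
      by_contra hge
      have hnil : s.toList.drop k = [] := List.drop_eq_nil_of_le (by omega)
      rw [hnil] at hpre
      exact absurd (List.prefix_nil.mp hpre) (by simp)
    have hAdrop : s.toList.dropWhile (fun x => x ≠ '(') = s.toList.drop k :=
      pv_dropWhile_of_spec '(' s.toList k hmin hpre
    have hAtail : (s.toList.drop k).tail = s.toList.drop (k + 1) := by
      rw [List.tail_drop]
    rw [if_neg (by omega), hfk, show ((k : Int) + 1) = ((k + 1 : Nat) : Int) by push_cast; ring,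
      PySem.Chars.findFrom_natCast s.toList [')'] (k+1) (by omega),
      pv_skip_eq, hAdrop, hAtail, pv_collect_eq]
    by_cases hr : PySem.Chars.find (s.toList.drop (k+1)) [')'] = -1
    · -- no ')' after the '(': B slices to len(s), A collects to the end of the string
      have hnotmem : ')' ∉ s.toList.drop (k+1) := fun hm =>
        (PySem.Chars.find_eq_neg_one_iff _ [')']).mp hr (pv_singleton_infix.mpr hm)
      have htake : (s.toList.drop (k+1)).takeWhile (fun x => x ≠ ')') = s.toList.drop (k+1) :=
        List.takeWhile_eq_self_iff.mpr (fun x hx => by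
          simp only [ne_eq, decide_eq_true_eq]
          rintro rfl; exact hnotmem hx)
      rw [if_pos hr, if_pos rfl, htake, PySem.Str.toList_replace, PySem.Str.toList_replace,
        PySem.Str.toList_replace, PySem.Str.toList_replace, PySem.Str.toList_slice,
        PySem.Chars.slice_eq_listSlice, PySem.Str.len_eq, PySem.List.slice_natCast,
        List.take_of_length_le (by simp), pv_chain_eq]
    · -- ')' found at index k+1+m: B slices [k+1 : k+1+m], A collects exactly those m chars
      have hrpos : 0 ≤ PySem.Chars.find (s.toList.drop (k+1)) [')'] := by
        have := PySem.Chars.neg_one_le_find (s.toList.drop (k+1)) [')']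
        omega
      obtain ⟨hpre2, hmin2⟩ := PySem.Chars.find_spec (s := s.toList.drop (k+1)) (sub := [')']) hrpos
      set m : Nat := (PySem.Chars.find (s.toList.drop (k+1)) [')']).toNat with hm
      have hfm : PySem.Chars.find (s.toList.drop (k+1)) [')'] = (m : Int) := by omega
      have htake : (s.toList.drop (k+1)).takeWhile (fun x => x ≠ ')') = (s.toList.drop (k+1)).take m :=
        pv_takeWhile_of_spec ')' (s.toList.drop (k+1)) m hmin2 hpre2
      rw [if_neg hr, hfm, show ((k + 1 : Nat) : Int) + (m : Int) = ((k + 1 + m : Nat) : Int) by push_cast; ring,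
        if_neg (by omega), htake, PySem.Str.toList_replace, PySem.Str.toList_replace,
        PySem.Str.toList_replace, PySem.Str.toList_replace, PySem.Str.toList_slice,
        PySem.Chars.slice_eq_listSlice, PySem.List.slice_natCast,
        show k + 1 + m - (k + 1) = m by omega, pv_chain_eq]
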